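-- pv_equiv track=rewrite | github.com/ikokkari/PythonProblems | labs109.py | des_chiffres
-- ===== SOURCE A (Python) =====
-- def des_chiffres(board, goal):
--     n = len(board)
--
--     def rec(items_, limit_):
--         if limit_ == 0:
--             return False
--         nn = len(items_)
--         prev = 0
--         for i in range(nn-1):
--             e1 = items_[i]
--             if e1 != prev:
--                 for j in range(i+1, nn):
--                     e2 = items_[j]
--                     es = [e for e in [e1+e2, e1*e2, e2-e1] if e > 0]
--                     if e2 % e1 == 0:
--                         es.append(e2 // e1)
--                     if goal in es:
--                         return True
--                     new_items = items_[:i] + items_[i + 1:j] + items_[j + 1:]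
--                     for e in es:
--                         if rec(sorted(new_items + [e]), limit_ - 1):
--                             return True
--             prev = e1
--
--     for limit in range(1, n):
--         if rec(sorted(board), limit):
--             return limit
--     return None
-- ===== SOURCE B (Python) =====
-- # B: level-by-level breadth-first search over a deduplicated set of board states
-- # (one frontier per operation count) instead of A's iterative-deepening DFS.
-- def des_chiffres(board, goal):
--     n = len(board)
--     frontier = {tuple(sorted(board))}
--     for k in range(1, n):
--         nxt = set()
--         for state in frontier:
--             m = len(state)
--             prev = 0
--             for i in range(m - 1):
--                 e1 = state[i]
--                 if e1 != prev:
--                     for j in range(i + 1, m):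
--                         e2 = state[j]
--                         es = [e for e in (e1 + e2, e1 * e2, e2 - e1) if e > 0]
--                         if e2 % e1 == 0:
--                             es.append(e2 // e1)
--                         if goal in es:
--                             return k
--                         rest = state[:i] + state[i + 1:j] + state[j + 1:]
--                         for e in es:
--                             nxt.add(tuple(sorted(rest + (e,))))
--                 prev = e1
--         frontier = nxt
--     return None
-- ===== Notes on version B (the rewrite author's own statement) =====
-- stated objective: alternative
-- what changed: Replaces A's iterative-deepening DFS (which restarts and re-explores the whole search tree for every depth limit, revisiting duplicate states) by a level-by-level BFS that keeps one deduplicated set of board states per operation count and returns the first level at which the goal is produced.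
-- outside the precondition, e.g. on des_chiffres([-2, 0, 5], 2): A returns 1, B returns 1; on des_chiffres([-2, 0, 5], 100): A raises ZeroDivisionError, B raises ZeroDivisionError
import Mathlib
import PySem

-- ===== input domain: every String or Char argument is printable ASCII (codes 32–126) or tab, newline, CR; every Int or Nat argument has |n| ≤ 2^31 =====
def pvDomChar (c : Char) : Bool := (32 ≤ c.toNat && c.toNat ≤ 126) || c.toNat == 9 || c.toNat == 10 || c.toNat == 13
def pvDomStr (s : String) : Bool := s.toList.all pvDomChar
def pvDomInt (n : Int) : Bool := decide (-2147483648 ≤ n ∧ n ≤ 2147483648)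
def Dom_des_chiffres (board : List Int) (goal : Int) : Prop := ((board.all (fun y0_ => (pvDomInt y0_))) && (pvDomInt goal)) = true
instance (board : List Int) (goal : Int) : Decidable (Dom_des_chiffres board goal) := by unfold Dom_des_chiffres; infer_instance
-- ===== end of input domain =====

-- B replaces A's iterative-deepening DFS by a level-by-level BFS over a deduplicated set of
-- board states (a different search strategy for the same minimal operation count).

-- ===== PORT A =====
-- es = [e for e in [e1+e2, e1*e2, e2-e1] if e > 0] (+ e2//e1 if e2%e1==0)
def pvEsA (e1 e2 : Int) : List Int :=
  ([e1 + e2, e1 * e2, e2 - e1].filter (fun e => decide (0 < e))) ++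
    (if PySem.Int.mod e2 e1 = 0 then [PySem.Int.floordiv e2 e1] else [])

-- items_[:i] + items_[i+1:j] + items_[j+1:]  (exact for the in-range Nat indices i < j used below)
def pvRestA (items : List Int) (i j : Nat) : List Int :=
  items.take i ++ ((items.drop (i + 1)).take (j - (i + 1))) ++ items.drop (j + 1)

-- rec(items_, limit_): the i-loop is a foldl carrying (prev, found) with found short-circuiting
-- the early returns; the j-loop and the es-loop are `any` (early return = first true).
def pvRecA (goal : Int) : Nat → List Int → Bool
  | 0, _ => false
  | l + 1, items =>
    let nn := items.length
    ((List.range (nn - 1)).foldl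
      (fun (acc : Int × Bool) i =>
        if acc.2 then acc
        else
          let e1 := items.getD i 0
          if e1 ≠ acc.1 then
            (e1, (List.range' (i + 1) (nn - 1 - i)).any (fun j =>
              let e2 := items.getD j 0
              let es := pvEsA e1 e2
              es.contains goal ||
                es.any (fun e =>
                  pvRecA goal l (PySem.List.sorted (pvRestA items i j ++ [e]) (fun x => x)))))
          else (e1, false))
      ((0 : Int), false)).2

def des_chiffres (board : List Int) (goal : Int) : Option Int :=
  let n := board.length
  Option.map (fun (limit : Nat) => (limit : Int))
    ((List.range' 1 (n - 1)).find? (fun limit =>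
      pvRecA goal limit (PySem.List.sorted board (fun x => x))))

-- ===== PORT B =====
def pvEsB (e1 e2 : Int) : List Int :=
  ([e1 + e2, e1 * e2, e2 - e1].filter (fun e => decide (0 < e))) ++
    (if PySem.Int.mod e2 e1 = 0 then [PySem.Int.floordiv e2 e1] else [])

-- state[:i] + state[i+1:j] + state[j+1:]  (exact for the in-range Nat indices i < j used below)
def pvRestB (state : List Int) (i j : Nat) : List Int :=
  state.take i ++ ((state.drop (i + 1)).take (j - (i + 1))) ++ state.drop (j + 1)

-- one state of the frontier: returns (goal hit?, nxt with this state's successors added);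
-- same (prev, found)-fold shape as the Python loops, the j/es loops thread (found, nxt).
def pvScanState (goal : Int) (state : List Int) (nxt : PySem.Set (List Int)) :
    Bool × PySem.Set (List Int) :=
  let m := state.length
  let r := (List.range (m - 1)).foldl
    (fun (acc : Int × Bool × PySem.Set (List Int)) i =>
      if acc.2.1 then acc
      else
        let e1 := state.getD i 0
        if e1 ≠ acc.1 then
          (e1, (List.range' (i + 1) (m - 1 - i)).foldl
            (fun (bc : Bool × PySem.Set (List Int)) j =>
              if bc.1 then bc
              else
                let e2 := state.getD j 0
                let es := pvEsB e1 e2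
                if es.contains goal then (true, bc.2)
                else (false, es.foldl (fun s e =>
                    PySem.Set.add s (PySem.List.sorted (pvRestB state i j ++ [e]) (fun x => x)))
                  bc.2))
            (false, acc.2.2))
        else (e1, false, acc.2.2))
    ((0 : Int), false, nxt)
  (r.2.1, r.2.2)

-- `for state in frontier:` with the `return k` early exit (the returned value does not depend
-- on the set's iteration order: only "some state hits" and the resulting set matter).
def pvScanFrontier (goal : Int) : List (List Int) → PySem.Set (List Int) →
    Bool × PySem.Set (List Int)
  | [], nxt => (false, nxt)
  | s :: rest, nxt =>
    let r := pvScanState goal s nxt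
    if r.1 then (true, r.2) else pvScanFrontier goal rest r.2

-- `for k in range(1, n):` over the frontier of states reachable with k-1 operations
def pvLoopB (goal : Int) : List Nat → PySem.Set (List Int) → Option Int
  | [], _ => none
  | k :: ks, frontier =>
    let r := pvScanFrontier goal frontier PySem.Set.empty
    if r.1 then some (k : Int) else pvLoopB goal ks r.2

def des_chiffres_alt (board : List Int) (goal : Int) : Option Int :=
  let n := board.length
  pvLoopB goal (List.range' 1 (n - 1))
    (PySem.Set.ofList [PySem.List.sorted board (fun x => x)])

-- ===== PRECONDITION & SPEC =====
-- Pre_ excludes boards containing both 0 and a negative number: there the `e1 != prev` test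
-- (prev starts at 0) fails to skip a zero left operand, so both implementations can raise
-- ZeroDivisionError at `e2 % e1`, and whether the goal is found before the crash depends on
-- traversal order.
def Pre_des_chiffres (board : List Int) (goal : Int) : Prop :=
  (0 : Int) ∉ board ∨ ∀ x ∈ board, 0 ≤ x

instance (board : List Int) (goal : Int) : Decidable (Pre_des_chiffres board goal) := by
  unfold Pre_des_chiffres; infer_instance

def pvWitness_des_chiffres : List Int × Int := ([1, 3, 7], 21)

def Spec_des_chiffres (board : List Int) (goal : Int) (out : Option Int) : Prop :=
  out = des_chiffres_alt board goal
instance (board : List Int) (goal : Int) (out : Option Int) :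
    Decidable (Spec_des_chiffres board goal out) := by unfold Spec_des_chiffres; infer_instance

-- ===== CLAIM (what is proved, stated in full; the proofs are below) =====
def Claim_equal_des_chiffres : Prop := ∀ (board : List Int) (goal : Int),
  Dom_des_chiffres board goal → Pre_des_chiffres board goal →
    Spec_des_chiffres board goal (des_chiffres board goal)

-- ===== LEMMAS AND PROOFS =====

-- `prev` before iteration i, and the resulting "pair (i, j) is skipped" test
def pvPrev (items : List Int) (i : Nat) : Int := if i = 0 then 0 else items.getD (i - 1) 0
def pvSkip (items : List Int) (i : Nat) : Bool := items.getD i 0 == pvPrev items i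

-- the state produced from `items` by combining positions i < j into the value e
def pvChild (items : List Int) (i j : Nat) (e : Int) : List Int :=
  PySem.List.sorted (pvRestA items i j ++ [e]) (fun x => x)

-- "some unskipped pair of items produces goal directly"
def pvHit (goal : Int) (items : List Int) : Bool :=
  (List.range (items.length - 1)).any (fun i =>
    !pvSkip items i &&
      (List.range' (i + 1) (items.length - 1 - i)).any (fun j =>
        (pvEsA (items.getD i 0) (items.getD j 0)).contains goal))

-- all states produced from items by one operation
def pvSuccs (items : List Int) : List (List Int) :=
  (List.range (items.length - 1)).flatMap (fun i =>
    if pvSkip items i then []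
    else
      (List.range' (i + 1) (items.length - 1 - i)).flatMap (fun j =>
        (pvEsA (items.getD i 0) (items.getD j 0)).map (pvChild items i j)))

-- "goal is produced after exactly d operations followed by one hitting operation"
def pvHb (goal : Int) : Nat → List Int → Bool
  | 0, s => pvHit goal s
  | d + 1, s => (pvSuccs s).any (pvHb goal d)

theorem pvMem_succs (items t : List Int) :
    t ∈ pvSuccs items ↔ ∃ i < items.length - 1, pvSkip items i = false ∧
      ∃ j, i + 1 ≤ j ∧ j < i + 1 + (items.length - 1 - i) ∧
        ∃ e ∈ pvEsA (items.getD i 0) (items.getD j 0), t = pvChild items i j e := by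
  simp only [pvSuccs, List.mem_flatMap, List.mem_range, List.mem_range'_1,
    List.mem_ite_nil_left, List.mem_map, Bool.not_eq_true]
  constructor
  · rintro ⟨i, hi, ⟨hs, j, hj, e, he, rfl⟩⟩
    exact ⟨i, hi, hs, j, hj.1, hj.2, e, he, rfl⟩
  · rintro ⟨i, hi, hs, j, hj1, hj2, e, he, rfl⟩
    exact ⟨i, hi, hs, j, ⟨hj1, hj2⟩, e, he, rfl⟩

theorem pvHit_iff (goal : Int) (items : List Int) :
    pvHit goal items = true ↔ ∃ i < items.length - 1, pvSkip items i = false ∧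
      ∃ j, i + 1 ≤ j ∧ j < i + 1 + (items.length - 1 - i) ∧
        goal ∈ pvEsA (items.getD i 0) (items.getD j 0) := by
  simp [pvHit, List.any_eq_true, List.mem_range, List.mem_range'_1, Bool.and_eq_true,
    and_assoc]

-- characterisation of A's (prev, found) fold
theorem pvFoldA_aux (items : List Int) (P : Nat → Bool) (m : Nat) :
    (((List.range m).foldl
      (fun (acc : Int × Bool) i =>
        if acc.2 then acc
        else
          let e1 := items.getD i 0
          if e1 ≠ acc.1 then (e1, P i) else (e1, false))
      ((0 : Int), false)).2 = (List.range m).any (fun i => !pvSkip items i && P i)) ∧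
    (((List.range m).foldl
      (fun (acc : Int × Bool) i =>
        if acc.2 then acc
        else
          let e1 := items.getD i 0
          if e1 ≠ acc.1 then (e1, P i) else (e1, false))
      ((0 : Int), false)).2 = false →
      ((List.range m).foldl
      (fun (acc : Int × Bool) i =>
        if acc.2 then acc
        else
          let e1 := items.getD i 0
          if e1 ≠ acc.1 then (e1, P i) else (e1, false))
      ((0 : Int), false)).1 = pvPrev items m) := by
  induction m with
  | zero => simp [pvPrev]
  | succ m ih =>
    obtain ⟨ih1, ih2⟩ := ih
    rw [List.range_succ, List.foldl_append, List.any_append]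
    set r := ((List.range m).foldl
      (fun (acc : Int × Bool) i =>
        if acc.2 then acc
        else
          let e1 := items.getD i 0
          if e1 ≠ acc.1 then (e1, P i) else (e1, false))
      ((0 : Int), false)) with hr
    by_cases h2 : r.2 = true
    · simp [h2, ih1 ▸ h2]
    · have h2f : r.2 = false := by simpa using h2
      have h1 : r.1 = pvPrev items m := ih2 h2f
      have hany : (List.range m).any (fun i => !pvSkip items i && P i) = false := ih1 ▸ h2f
      by_cases he : items[m]?.getD 0 = pvPrev items m
      · have hs : pvSkip items m = true := by simp [pvSkip, List.getD, he]
        simp [List.foldl_cons, h2f, h1, hany, hs, pvPrev, List.getD, he]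
      · have hs : pvSkip items m = false := by simp [pvSkip, List.getD, he]
        simp [List.foldl_cons, h2f, h1, hany, hs, List.getD, he]
        intro _
        simp [pvPrev, List.getD]

-- A's recursion unfolds to hit-or-recurse over pvSuccs
theorem pvRecA_succ (goal : Int) (l : Nat) (items : List Int) :
    pvRecA goal (l + 1) items =
      (pvHit goal items || (pvSuccs items).any (pvRecA goal l)) := by
  have h := (pvFoldA_aux items (fun i =>
    (List.range' (i + 1) (items.length - 1 - i)).any (fun j =>
      let e2 := items.getD j 0
      let es := pvEsA (items.getD i 0) e2
      es.contains goal ||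
        es.any (fun e =>
          pvRecA goal l (PySem.List.sorted (pvRestA items i j ++ [e]) (fun x => x)))))
    (items.length - 1)).1
  simp only [pvRecA]
  rw [h]
  rw [Bool.eq_iff_iff]
  simp only [List.any_eq_true, Bool.and_eq_true, Bool.not_eq_true', Bool.or_eq_true,
    List.mem_range, List.mem_range'_1, pvHit_iff, pvMem_succs, List.contains_iff_mem,
    pvChild]
  constructor
  · rintro ⟨i, hi, hs, j, hj, hor⟩
    rcases hor with hg | ⟨e, he, hrec⟩
    · exact Or.inl ⟨i, hi, hs, j, hj.1, hj.2, hg⟩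
    · exact Or.inr ⟨_, ⟨i, hi, hs, j, hj.1, hj.2, e, he, rfl⟩, hrec⟩
  · rintro (⟨i, hi, hs, j, hj1, hj2, hg⟩ | ⟨t, ⟨i, hi, hs, j, hj1, hj2, e, he, rfl⟩, hrec⟩)
    · exact ⟨i, hi, hs, j, ⟨hj1, hj2⟩, Or.inl hg⟩
    · exact ⟨i, hi, hs, j, ⟨hj1, hj2⟩, Or.inr ⟨e, he, hrec⟩⟩

-- A's recursion = "goal produced within l operations"
theorem pvRecA_eq (goal : Int) (l : Nat) (s : List Int) :
    pvRecA goal l s = (List.range l).any (fun d => pvHb goal d s) := by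
  induction l generalizing s with
  | zero => rfl
  | succ l ih =>
    rw [pvRecA_succ]
    rw [show (pvRecA goal l) = (fun t => (List.range l).any fun d => pvHb goal d t) from
      funext ih]
    rw [Bool.eq_iff_iff]
    simp only [List.range_succ_eq_map, List.any_cons, List.any_map, Bool.or_eq_true,
      List.any_eq_true, Function.comp, pvHb]
    tauto

theorem pvEsB_eq : pvEsB = pvEsA := rfl
theorem pvRestB_eq : pvRestB = pvRestA := rfl

-- the inner (j-loop) step of pvScanState, named for the proofs
def pvInnerStepB (goal : Int) (state : List Int) (i : Nat) :
    (Bool × PySem.Set (List Int)) → Nat → (Bool × PySem.Set (List Int)) :=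
  fun bc j =>
    if bc.1 then bc
    else
      let e2 := state.getD j 0
      let es := pvEsB (state.getD i 0) e2
      if es.contains goal then (true, bc.2)
      else (false, es.foldl (fun s e =>
          PySem.Set.add s (PySem.List.sorted (pvRestB state i j ++ [e]) (fun x => x))) bc.2)

theorem pvMemFoldAdd (f : Int → List Int) : ∀ (es : List Int) (c : PySem.Set (List Int))
    (t : List Int), t ∈ es.foldl (fun s e => PySem.Set.add s (f e)) c ↔
      t ∈ c ∨ ∃ e ∈ es, t = f e := by
  intro es
  induction es with
  | nil => simp
  | cons e es ih =>
    intro c t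
    rw [List.foldl_cons, ih, PySem.Set.mem_add]
    constructor
    · rintro (⟨h | h⟩ | ⟨e', he', rfl⟩)
      · exact Or.inl h
      · exact Or.inr ⟨e, List.mem_cons_self .., h⟩
      · exact Or.inr ⟨e', List.mem_cons_of_mem _ he', rfl⟩
    · rintro (h | ⟨e', he', rfl⟩)
      · exact Or.inl (Or.inl h)
      · rcases List.mem_cons.mp he' with rfl | he'
        · exact Or.inl (Or.inr rfl)
        · exact Or.inr ⟨e', he', rfl⟩

theorem pvInnerTrue (goal : Int) (state : List Int) (i : Nat) :
    ∀ (js : List Nat) (c : PySem.Set (List Int)),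
      js.foldl (pvInnerStepB goal state i) (true, c) = (true, c) := by
  intro js
  induction js with
  | nil => simp
  | cons j js ih => intro c; rw [List.foldl_cons]; simp only [pvInnerStepB]; simp [ih]

theorem pvInnerB_aux (goal : Int) (state : List Int) (i : Nat) :
    ∀ (js : List Nat) (c : PySem.Set (List Int)),
      ((js.foldl (pvInnerStepB goal state i) (false, c)).1 =
        js.any (fun j => (pvEsB (state.getD i 0) (state.getD j 0)).contains goal)) ∧
      ((js.foldl (pvInnerStepB goal state i) (false, c)).1 = false → ∀ t,
        t ∈ (js.foldl (pvInnerStepB goal state i) (false, c)).2 ↔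
          t ∈ c ∨ ∃ j ∈ js, ∃ e ∈ pvEsB (state.getD i 0) (state.getD j 0),
            t = pvChild state i j e) := by
  intro js
  induction js with
  | nil => simp
  | cons j js ih =>
    intro c
    by_cases hc : (pvEsB (state.getD i 0) (state.getD j 0)).contains goal = true
    · rw [List.foldl_cons]
      have hstep : pvInnerStepB goal state i (false, c) j =
          (true, c) := by simp only [pvInnerStepB]; rw [hc]; simp
      rw [hstep, pvInnerTrue]
      refine ⟨?_, by simp⟩
      rw [List.any_cons, hc]
      rfl
    · have hcf : (pvEsB (state.getD i 0) (state.getD j 0)).contains goal = false := by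
        simpa using hc
      rw [List.foldl_cons]
      have hstep : pvInnerStepB goal state i (false, c) j =
          (false, (pvEsB (state.getD i 0) (state.getD j 0)).foldl (fun s e =>
            PySem.Set.add s (PySem.List.sorted (pvRestB state i j ++ [e]) (fun x => x))) c) := by
        simp [pvInnerStepB]
        simpa using hcf
      rw [hstep]
      obtain ⟨ih1, ih2⟩ := ih ((pvEsB (state.getD i 0) (state.getD j 0)).foldl (fun s e =>
            PySem.Set.add s (PySem.List.sorted (pvRestB state i j ++ [e]) (fun x => x))) c)
      refine ⟨by rw [List.any_cons, hcf, Bool.false_or]; exact ih1, ?_⟩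
      intro hf t
      rw [ih2 hf t]
      rw [pvMemFoldAdd (fun e => PySem.List.sorted (pvRestB state i j ++ [e]) (fun x => x))]
      simp only [pvChild, pvRestB_eq, List.mem_cons]
      constructor
      · rintro (⟨h | ⟨e, he, rfl⟩⟩ | ⟨j', hj', e, he, rfl⟩)
        · tauto
        · exact Or.inr ⟨j, Or.inl rfl, e, he, rfl⟩
        · exact Or.inr ⟨j', Or.inr hj', e, he, rfl⟩
      · rintro (h | ⟨j', hj' | hj', e, he, rfl⟩)
        · tauto
        · subst hj'; exact Or.inl (Or.inr ⟨e, he, rfl⟩)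
        · exact Or.inr ⟨j', hj', e, he, rfl⟩

-- the outer (i-loop) step of pvScanState, named for the proofs
def pvStepB (goal : Int) (state : List Int) :
    (Int × Bool × PySem.Set (List Int)) → Nat → (Int × Bool × PySem.Set (List Int)) :=
  fun acc i =>
    if acc.2.1 then acc
    else
      let e1 := state.getD i 0
      if e1 ≠ acc.1 then
        (e1, (List.range' (i + 1) (state.length - 1 - i)).foldl
          (pvInnerStepB goal state i) (false, acc.2.2))
      else (e1, false, acc.2.2)

theorem pvFoldB_aux (goal : Int) (state : List Int) (nxt : PySem.Set (List Int)) (m : Nat) :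
    (((List.range m).foldl (pvStepB goal state) ((0 : Int), false, nxt)).2.1 =
      (List.range m).any (fun i => !pvSkip state i &&
        (List.range' (i + 1) (state.length - 1 - i)).any (fun j =>
          (pvEsB (state.getD i 0) (state.getD j 0)).contains goal))) ∧
    (((List.range m).foldl (pvStepB goal state) ((0 : Int), false, nxt)).2.1 = false →
      ((List.range m).foldl (pvStepB goal state) ((0 : Int), false, nxt)).1 =
        pvPrev state m) ∧
    (((List.range m).foldl (pvStepB goal state) ((0 : Int), false, nxt)).2.1 = false → ∀ t,
      t ∈ ((List.range m).foldl (pvStepB goal state) ((0 : Int), false, nxt)).2.2 ↔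
        t ∈ nxt ∨ ∃ i ∈ List.range m, pvSkip state i = false ∧
          ∃ j ∈ List.range' (i + 1) (state.length - 1 - i),
            ∃ e ∈ pvEsB (state.getD i 0) (state.getD j 0), t = pvChild state i j e) := by
  induction m with
  | zero => simp [pvPrev]
  | succ m ih =>
    obtain ⟨ih1, ih2, ih3⟩ := ih
    rw [List.range_succ, List.foldl_append, List.any_append, List.foldl_cons, List.foldl_nil]
    set r := (List.range m).foldl (pvStepB goal state) ((0 : Int), false, nxt) with hr
    by_cases h2 : r.2.1 = true
    · have hkeep : pvStepB goal state r m = r := by simp [pvStepB, h2]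
      rw [hkeep]
      have hT := ih1 ▸ h2
      refine ⟨by rw [h2, hT]; rfl, ?_, ?_⟩
      · intro hf; rw [h2] at hf; cases hf
      · intro hf; rw [h2] at hf; cases hf
    · have h2f : r.2.1 = false := by simpa using h2
      have h1 : r.1 = pvPrev state m := ih2 h2f
      have hany := ih1 ▸ h2f
      by_cases he : state[m]?.getD 0 = pvPrev state m
      · have hs : pvSkip state m = true := by simp [pvSkip, List.getD, he]
        have hkeep : pvStepB goal state r m = (state.getD m 0, false, r.2.2) := by
          simp [pvStepB, h2f, h1, List.getD, he]
        rw [hkeep]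
        refine ⟨?_, ?_, ?_⟩
        · dsimp only
          rw [hany]
          simp [List.any_cons, hs]
        · intro _; simp [pvPrev, List.getD]
        · intro _ t
          dsimp only
          rw [ih3 h2f t]
          simp only [List.mem_range, List.mem_append, List.mem_singleton]
          constructor
          · rintro (h | ⟨i, hi, hrest⟩)
            · exact Or.inl h
            · exact Or.inr ⟨i, Or.inl hi, hrest⟩
          · rintro (h | ⟨i, hi | rfl, hsk, hrest⟩)
            · exact Or.inl h
            · exact Or.inr ⟨i, hi, hsk, hrest⟩
            · rw [hs] at hsk; cases hsk
      · have hs : pvSkip state m = false := by simp [pvSkip, List.getD, he]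
        have hkeep : pvStepB goal state r m =
            (state.getD m 0, (List.range' (m + 1) (state.length - 1 - m)).foldl
              (pvInnerStepB goal state m) (false, r.2.2)) := by
          simp [pvStepB, h2f, h1, List.getD, he]
        rw [hkeep]
        obtain ⟨i1, i2⟩ := pvInnerB_aux goal state m
          (List.range' (m + 1) (state.length - 1 - m)) r.2.2
        by_cases hq : (List.range' (m + 1) (state.length - 1 - m)).any (fun j =>
            (pvEsB (state.getD m 0) (state.getD j 0)).contains goal) = true
        · refine ⟨?_, ?_, ?_⟩
          · dsimp only
            rw [i1, hq, hany]
            simp only [List.any_cons, List.any_nil, hs, hq, Bool.not_false, Bool.true_and,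
              Bool.or_false, Bool.false_or]
          · intro hf
            dsimp only at hf
            rw [i1, hq] at hf; cases hf
          · intro hf
            dsimp only at hf
            rw [i1, hq] at hf; cases hf
        · have hqf : (List.range' (m + 1) (state.length - 1 - m)).any (fun j =>
              (pvEsB (state.getD m 0) (state.getD j 0)).contains goal) = false := by
            simpa using hq
          refine ⟨?_, ?_, ?_⟩
          · dsimp only
            rw [i1, hqf, hany]
            simp only [List.any_cons, List.any_nil, hs, hqf, Bool.not_false, Bool.true_and,
              Bool.or_false, Bool.false_or]
          · intro _; simp [pvPrev, List.getD]
          · intro _ t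
            dsimp only
            rw [i2 (by rw [i1, hqf]) t, ih3 h2f t]
            simp only [List.mem_range, List.mem_append, List.mem_singleton]
            constructor
            · rintro ((h | ⟨i, hi, hrest⟩) | ⟨j, hj, hrest⟩)
              · exact Or.inl h
              · exact Or.inr ⟨i, Or.inl hi, hrest⟩
              · exact Or.inr ⟨m, Or.inr rfl, hs, j, hj, hrest⟩
            · rintro (h | ⟨i, hi | rfl, hsk, hrest⟩)
              · exact Or.inl (Or.inl h)
              · exact Or.inl (Or.inr ⟨i, hi, hsk, hrest⟩)
              · exact Or.inr hrest

-- B: the hit flag of one state scan is pvHit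
theorem pvScanState_fst (goal : Int) (s : List Int) (nxt : PySem.Set (List Int)) :
    (pvScanState goal s nxt).1 = pvHit goal s := by
  exact (pvFoldB_aux goal s nxt (s.length - 1)).1

-- B: a non-hitting state scan adds exactly its successors to the set
theorem pvScanState_snd (goal : Int) (s : List Int) (nxt : PySem.Set (List Int))
    (h : pvHit goal s = false) (t : List Int) :
    t ∈ (pvScanState goal s nxt).2 ↔ t ∈ nxt ∨ t ∈ pvSuccs s := by
  have hb := pvFoldB_aux goal s nxt (s.length - 1)
  have hflag : (pvScanState goal s nxt).1 = pvHit goal s := hb.1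
  have hmem := hb.2.2 (hflag.trans h) t
  refine hmem.trans (or_congr Iff.rfl ?_)
  rw [pvMem_succs]
  simp only [List.mem_range, List.mem_range'_1, pvEsB_eq]
  constructor
  · rintro ⟨i, hi, hs, j, hj, he⟩
    exact ⟨i, hi, hs, j, hj.1, hj.2, he⟩
  · rintro ⟨i, hi, hs, j, hj1, hj2, he⟩
    exact ⟨i, hi, hs, j, ⟨hj1, hj2⟩, he⟩

theorem pvScanFrontier_fst (goal : Int) (L : List (List Int)) (nxt : PySem.Set (List Int)) :
    (pvScanFrontier goal L nxt).1 = L.any (pvHit goal) := by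
  induction L generalizing nxt with
  | nil => rfl
  | cons s rest ih =>
    simp only [pvScanFrontier, pvScanState_fst, List.any_cons]
    by_cases hh : pvHit goal s = true
    · simp [hh]
    · simp only [Bool.not_eq_true] at hh
      simp [hh, ih]

theorem pvScanFrontier_snd (goal : Int) (L : List (List Int)) (nxt : PySem.Set (List Int))
    (h : L.any (pvHit goal) = false) (t : List Int) :
    t ∈ (pvScanFrontier goal L nxt).2 ↔ t ∈ nxt ∨ ∃ s ∈ L, t ∈ pvSuccs s := by
  induction L generalizing nxt with
  | nil => simp [pvScanFrontier]
  | cons s rest ih =>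
    rw [List.any_cons] at h
    have hs : pvHit goal s = false := by
      cases hhit : pvHit goal s
      · rfl
      · rw [hhit] at h; cases h
    have hrest : rest.any (pvHit goal) = false := by
      rw [hs] at h; simpa using h
    simp only [pvScanFrontier, pvScanState_fst, hs]
    simp only [Bool.false_eq_true, if_false]
    rw [ih _ hrest, pvScanState_snd goal s nxt hs t]
    simp only [List.mem_cons]
    constructor
    · rintro ((h1 | h1) | ⟨s', hs', h1⟩)
      · exact Or.inl h1
      · exact Or.inr ⟨s, Or.inl rfl, h1⟩
      · exact Or.inr ⟨s', Or.inr hs', h1⟩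
    · rintro (h1 | ⟨s', rfl | hs', h1⟩)
      · exact Or.inl (Or.inl h1)
      · exact Or.inl (Or.inr h1)
      · exact Or.inr ⟨s', hs', h1⟩

-- B's loop = first level whose frontier hits
theorem pvLoopB_spec (goal : Int) (m k : Nat) (F : PySem.Set (List Int)) :
    pvLoopB goal (List.range' k m) F =
      match (List.range m).find? (fun d => F.any (pvHb goal d)) with
      | some d => some ((k + d : Nat) : Int)
      | none => none := by
  induction m generalizing k F with
  | zero => rfl
  | succ m ih =>
    rw [List.range'_succ]
    simp only [pvLoopB, pvScanFrontier_fst]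
    by_cases hh : F.any (pvHit goal) = true
    · rw [hh]
      simp only [if_true]
      rw [List.range_succ_eq_map, List.find?_cons_of_pos (by simpa [pvHb] using hh)]
      simp
    · have hhf : F.any (pvHit goal) = false := by simpa using hh
      rw [hhf]
      simp only [Bool.false_eq_true, if_false]
      rw [ih (k + 1) ((pvScanFrontier goal F PySem.Set.empty).2)]
      have hptw : (fun d => ((pvScanFrontier goal F PySem.Set.empty).2).any (pvHb goal d)) =
          (fun d => F.any (pvHb goal (d + 1))) := by
        funext d
        rw [Bool.eq_iff_iff]
        simp only [List.any_eq_true]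
        constructor
        · rintro ⟨t, ht, hd⟩
          rw [pvScanFrontier_snd goal F PySem.Set.empty hhf t] at ht
          rcases ht with ht | ⟨s', hs', ht⟩
          · cases ht
          · exact ⟨s', hs', by simp only [pvHb, List.any_eq_true]; exact ⟨t, ht, hd⟩⟩
        · rintro ⟨s', hs', hd⟩
          simp only [pvHb, List.any_eq_true] at hd
          obtain ⟨t, ht, hd⟩ := hd
          refine ⟨t, ?_, hd⟩
          rw [pvScanFrontier_snd goal F PySem.Set.empty hhf t]
          exact Or.inr ⟨s', hs', ht⟩
      rw [hptw]
      rw [List.range_succ_eq_map, List.find?_cons_of_neg (by simpa [pvHb] using hhf),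
        List.find?_map]
      cases hfind : (List.range m).find? ((fun d => F.any (pvHb goal d)) ∘ Nat.succ) with
      | none =>
        have : (List.range m).find? (fun d => F.any (pvHb goal (d + 1))) = none := hfind
        rw [this]
        simp
      | some d =>
        have : (List.range m).find? (fun d => F.any (pvHb goal (d + 1))) = some d := hfind
        rw [this]
        simp only [Option.map_some]
        congr 1
        omega

-- A's outer loop = first depth d with pvHb, plus one
theorem pvFindA (p : Nat → Bool) : ∀ (m k : Nat), (List.range k).any p = false →
    ((List.range' (k + 1) m).find? (fun l => (List.range l).any p)).map
        (fun l => ((l : Nat) : Int)) =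
      match (List.range' k m).find? p with
      | some d => some ((d : Int) + 1)
      | none => none := by
  intro m
  induction m with
  | zero => intro _ _; rfl
  | succ m ih =>
    intro k h
    rw [List.range'_succ, List.range'_succ]
    by_cases hp : p k = true
    · rw [List.find?_cons_of_pos (by rw [List.range_succ, List.any_append]; simp [hp]),
        List.find?_cons_of_pos hp]
      simp
    · have hpf : p k = false := by simpa using hp
      have h' : (List.range (k + 1)).any p = false := by
        rw [List.range_succ, List.any_append]
        simp [h, hpf]
      rw [List.find?_cons_of_neg (by simp [h']), List.find?_cons_of_neg (by simp [hpf])]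
      exact ih (k + 1) h'

-- ===== VERDICT (by name: the statement is the Claim_ definition above) =====
theorem des_chiffres_spec : Claim_equal_des_chiffres := by
  intro board goal _ _
  unfold Spec_des_chiffres
  have hA : des_chiffres board goal =
      Option.map (fun (limit : Nat) => (limit : Int))
        ((List.range' 1 (board.length - 1)).find? (fun limit =>
          pvRecA goal limit (PySem.List.sorted board (fun x => x)))) := rfl
  have hB : des_chiffres_alt board goal =
      pvLoopB goal (List.range' 1 (board.length - 1))
        (PySem.Set.ofList [PySem.List.sorted board (fun x => x)]) := rfl
  rw [hA, hB]
  rw [show (fun limit => pvRecA goal limit (PySem.List.sorted board (fun x => x))) =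
      (fun limit => (List.range limit).any (fun d =>
        pvHb goal d (PySem.List.sorted board (fun x => x)))) from
    funext (fun l => pvRecA_eq goal l (PySem.List.sorted board (fun x => x)))]
  rw [show (List.range' 1 (board.length - 1)) = (List.range' (0 + 1) (board.length - 1)) from rfl]
  rw [pvFindA (fun d => pvHb goal d (PySem.List.sorted board (fun x => x)))
    (board.length - 1) 0 (by simp)]
  rw [pvLoopB_spec goal (board.length - 1) 1
    (PySem.Set.ofList [PySem.List.sorted board (fun x => x)])]
  have hofl : (PySem.Set.ofList [PySem.List.sorted board (fun x => x)]) =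
      [PySem.List.sorted board (fun x => x)] := rfl
  have hptw : (fun d => (PySem.Set.ofList [PySem.List.sorted board (fun x => x)]).any
      (pvHb goal d)) = (fun d => pvHb goal d (PySem.List.sorted board (fun x => x))) := by
    funext d
    rw [hofl, List.any_cons, List.any_nil, Bool.or_false]
  rw [hptw]
  rw [show (List.range' 0 (board.length - 1)) = List.range (board.length - 1) from
    List.range_eq_range'.symm]
  cases hfind : (List.range (board.length - 1)).find?
      (fun d => pvHb goal d (PySem.List.sorted board (fun x => x))) with
  | none => rfl
  | some d =>
    simp only []
    congr 1
    omega
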